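-- pv_equiv track=rewrite | github.com/ivantohelpyou/spawn-experiments | experiments/1.501.1-email-validator-severed-branch/3-test-first-development/email_validator.py | _validate_domain_label
-- ===== SOURCE A (Python) =====
-- DOMAIN_LABEL_ALLOWED_CHARS = set('abcdefghijklmnopqrstuvwxyzABCDEFGHIJKLMNOPQRSTUVWXYZ0123456789-')
--
-- def _validate_domain_label(label: str, is_tld: bool = False) -> bool:
--     """Validate a single domain label"""
--     # Length constraints
--     if len(label) == 0 or len(label) > 63:
--         return False
--
--     # TLD specific rules
--     if is_tld:
--         # TLD must be at least 2 characters
--         if len(label) < 2: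
--             return False
--         # TLD must be letters only
--         if not label.isalpha():
--             return False
--     else:
--         # Regular domain labels: a-z, A-Z, 0-9, hyphens (not at start/end)
--         if not all(c in DOMAIN_LABEL_ALLOWED_CHARS for c in label):
--             return False
--
--         # Cannot start or end with hyphen
--         if label.startswith('-') or label.endswith('-'):
--             return False
--
--     return True
-- ===== SOURCE B (Python) =====
-- def _validate_domain_label(label: str, is_tld: bool = False) -> bool:
--     """Validate a single domain label (single-pass DFA for the non-TLD branch)."""
--     n = len(label)
--     if not (1 <= n <= 63):
--         return False
--     if is_tld:
--         return n >= 2 and label.isalpha()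
--     # DFA: state 0 = at start (alnum required), 1 = last char alnum (accepting),
--     # 2 = last char hyphen (continue, but not accepting)
--     state = 0
--     for c in label:
--         if ('a' <= c <= 'z') or ('A' <= c <= 'Z') or ('0' <= c <= '9'):
--             state = 1
--         elif c == '-' and state != 0:
--             state = 2
--         else:
--             return False
--     return state == 1
-- ===== Notes on version B (the rewrite author's own statement) =====
-- stated objective: alternative
-- what changed: The non-TLD branch's three separate passes (set-membership all(), startswith, endswith) are replaced by one single-pass three-state DFA over the characters; the length guard and TLD branch keep their logic.
import Mathlib
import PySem

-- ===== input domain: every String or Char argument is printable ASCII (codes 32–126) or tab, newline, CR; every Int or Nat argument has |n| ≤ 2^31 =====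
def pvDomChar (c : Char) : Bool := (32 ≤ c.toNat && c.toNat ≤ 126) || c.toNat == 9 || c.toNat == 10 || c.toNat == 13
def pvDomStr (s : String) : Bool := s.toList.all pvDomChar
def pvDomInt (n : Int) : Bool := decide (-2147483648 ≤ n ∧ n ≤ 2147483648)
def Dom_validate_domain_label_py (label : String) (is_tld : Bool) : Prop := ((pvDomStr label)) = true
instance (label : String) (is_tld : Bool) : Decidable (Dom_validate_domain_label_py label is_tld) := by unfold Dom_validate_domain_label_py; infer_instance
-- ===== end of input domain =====

-- B replaces A's three separate non-TLD passes (set-membership all(), startswith, endswith)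
-- by one single-pass three-state DFA over the characters; length guard and TLD branch keep A's logic.


-- ===== PORT A =====
def pvAllowedChars : PySem.Set Char :=
  PySem.Set.ofList "abcdefghijklmnopqrstuvwxyzABCDEFGHIJKLMNOPQRSTUVWXYZ0123456789-".toList

def validate_domain_label_py (label : String) (is_tld : Bool) : Bool :=
  if PySem.Str.len label == 0 || PySem.Str.len label > 63 then false
  else if is_tld then
    if PySem.Str.len label < 2 then false
    else if !(PySem.Str.strIsalpha label) then false
    else true
  else
    if !(label.toList.all (fun c => PySem.Set.contains pvAllowedChars c)) then false
    else if PySem.Str.startswith label "-" || PySem.Str.endswith label "-" then false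
    else true

-- ===== PORT B =====
def pvAlnumAscii (c : Char) : Bool :=
  ('a' ≤ c && c ≤ 'z') || ('A' ≤ c && c ≤ 'Z') || ('0' ≤ c && c ≤ '9')

-- the DFA loop of Source B: state 0 = at start, 1 = last char alnum (accepting), 2 = last char hyphen
def pvScan : Nat → List Char → Bool
  | st, [] => st == 1
  | st, c :: rest =>
    if pvAlnumAscii c then pvScan 1 rest
    else if c == '-' && st != 0 then pvScan 2 rest
    else false

def validate_domain_label_py_alt (label : String) (is_tld : Bool) : Bool :=
  let n := PySem.Str.len label
  if !(decide (1 ≤ n) && decide (n ≤ 63)) then false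
  else if is_tld then decide (2 ≤ n) && PySem.Str.strIsalpha label
  else pvScan 0 label.toList

-- ===== PRECONDITION & SPEC =====
def Spec_validate_domain_label_py (label : String) (is_tld : Bool) (out : Bool) : Prop := out = validate_domain_label_py_alt label is_tld
instance (label : String) (is_tld : Bool) (out : Bool) : Decidable (Spec_validate_domain_label_py label is_tld out) := by unfold Spec_validate_domain_label_py; infer_instance

-- ===== CLAIM (what is proved, stated in full; the proofs are below) =====
def Claim_equal_validate_domain_label_py : Prop := ∀ (label : String) (is_tld : Bool), Dom_validate_domain_label_py label is_tld → Spec_validate_domain_label_py label is_tld (validate_domain_label_py label is_tld)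

-- ===== LEMMAS AND PROOFS =====

-- allowed char = ASCII alnum or hyphen
def pvOkc (c : Char) : Bool := pvAlnumAscii c || c == '-'

-- last character is '-' (boolean, by structural recursion)
def pvLastHy : List Char → Bool
  | [] => false
  | [c] => c == '-'
  | _ :: c :: r => pvLastHy (c :: r)

theorem pvAlnum_ne_hyphen {c : Char} (h : pvAlnumAscii c = true) : (c == '-') = false := by
  by_cases hc : c = '-'
  · subst hc; simp [pvAlnumAscii] at h
  · simp [hc]

-- on the domain, membership in the allowed set is exactly pvOkc
theorem pvContains_eq_okc (c : Char) (hd : pvDomChar c = true) :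
    PySem.Set.contains pvAllowedChars c = pvOkc c := by
  have hlt : c.toNat < 127 := by
    simp only [pvDomChar, Bool.or_eq_true, Bool.and_eq_true, decide_eq_true_eq, beq_iff_eq] at hd
    omega
  have h : ∀ n ∈ List.range 127,
      PySem.Set.contains pvAllowedChars (Char.ofNat n) = pvOkc (Char.ofNat n) := by
    set_option maxRecDepth 8192 in decide
  have := h c.toNat (List.mem_range.mpr hlt)
  rwa [Char.ofNat_toNat] at this

theorem pvScan_cons_alnum (st : Nat) {c : Char} (r : List Char) (h : pvAlnumAscii c = true) :
    pvScan st (c :: r) = pvScan 1 r := by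
  simp [pvScan, h]

theorem pvScan_cons_hyphen (st : Nat) (r : List Char) (hst : (st != 0) = true) :
    pvScan st ('-' :: r) = pvScan 2 r := by
  have ha : pvAlnumAscii '-' = false := by decide
  simp [pvScan, ha, hst]

theorem pvScan_cons_bad (st : Nat) {c : Char} (r : List Char)
    (ha : pvAlnumAscii c = false) (hne : (c == '-') = false) :
    pvScan st (c :: r) = false := by
  simp [pvScan, ha, hne]

theorem pvLastHy_cons_cons (c d : Char) (t : List Char) :
    pvLastHy (c :: d :: t) = pvLastHy (d :: t) := rfl

theorem pvScan_one_two (cs : List Char) :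
    (pvScan 1 cs = (cs.all pvOkc && !pvLastHy cs)) ∧
    (pvScan 2 cs = (!cs.isEmpty && (cs.all pvOkc && !pvLastHy cs))) := by
  induction cs with
  | nil => simp [pvScan, pvLastHy]
  | cons c r ih =>
    by_cases ha : pvAlnumAscii c = true
    · have hne := pvAlnum_ne_hyphen ha
      refine ⟨?_, ?_⟩ <;>
      · rw [pvScan_cons_alnum _ r ha, ih.1]
        cases r with
        | nil => simp [pvOkc, ha, hne, pvLastHy]
        | cons d t => rw [pvLastHy_cons_cons]; simp [pvOkc, ha]
    · have ha' : pvAlnumAscii c = false := by simpa using ha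
      by_cases hh : c = '-'
      · subst hh
        refine ⟨?_, ?_⟩ <;>
        · rw [pvScan_cons_hyphen _ r (by decide), ih.2]
          cases r with
          | nil => simp [pvOkc, ha', pvLastHy]
          | cons d t => rw [pvLastHy_cons_cons]; simp [pvOkc, ha']
      · have hne : (c == '-') = false := by simp [hh]
        rw [Bool.eq_iff_iff] at hne
        simp only [beq_iff_eq] at hne
        refine ⟨?_, ?_⟩ <;>
        · rw [pvScan_cons_bad _ r ha' (by simp [hh])]
          simp [pvOkc, ha', hh]

theorem pvScan_zero (c : Char) (rest : List Char) :
    pvScan 0 (c :: rest) = (pvAlnumAscii c && (rest.all pvOkc && !pvLastHy rest)) := by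
  by_cases ha : pvAlnumAscii c = true
  · rw [pvScan_cons_alnum _ rest ha, (pvScan_one_two rest).1]; simp [ha]
  · have ha' : pvAlnumAscii c = false := by simpa using ha
    by_cases hh : c = '-'
    · subst hh
      have : pvScan 0 ('-' :: rest) = false := by simp [pvScan, ha']
      simp [this, ha']
    · rw [pvScan_cons_bad _ rest ha' (by simp [hh])]; simp [ha']

theorem pvEndswith_eq_lastHy (cs : List Char) :
    PySem.Chars.endswith cs ['-'] = pvLastHy cs := by
  induction cs with
  | nil =>
    rw [Bool.eq_iff_iff, PySem.Chars.endswith_iff]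
    simp [pvLastHy]
  | cons c r ih =>
    cases r with
    | nil =>
      rw [Bool.eq_iff_iff, PySem.Chars.endswith_iff]
      constructor
      · intro h
        have h2 := List.IsSuffix.eq_of_length h (by simp)
        simp only [pvLastHy]
        injection h2 with h3 _
        simp [← h3]
      · intro h
        simp only [pvLastHy, beq_iff_eq] at h
        simp [h]
    | cons d t =>
      rw [Bool.eq_iff_iff, PySem.Chars.endswith_iff]
      rw [Bool.eq_iff_iff, PySem.Chars.endswith_iff] at ih
      simp only [pvLastHy]
      rw [← ih, List.suffix_cons_iff]
      simp

theorem pvStartswith_eq (c : Char) (rest : List Char) :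
    PySem.Chars.startswith (c :: rest) ['-'] = (c == '-') := by
  rw [Bool.eq_iff_iff, PySem.Chars.startswith_iff, List.cons_prefix_cons]
  constructor
  · rintro ⟨h, -⟩
    simp [← h]
  · intro h
    exact ⟨(beq_iff_eq.mp h).symm, List.nil_prefix⟩

-- the whole non-TLD branch of A equals the DFA, on the domain
theorem pvNonTld (c : Char) (rest : List Char)
    (hd : (c :: rest).all pvDomChar = true) :
    (if !((c :: rest).all (fun x => PySem.Set.contains pvAllowedChars x)) then false
     else if PySem.Chars.startswith (c :: rest) ['-'] || PySem.Chars.endswith (c :: rest) ['-'] then false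
     else true) = pvScan 0 (c :: rest) := by
  have hdomx : ∀ x ∈ c :: rest, pvDomChar x = true := by simpa [List.all_eq_true] using hd
  have hall : (c :: rest).all (fun x => PySem.Set.contains pvAllowedChars x)
      = (c :: rest).all pvOkc := by
    rw [Bool.eq_iff_iff]
    simp only [List.all_eq_true]
    constructor
    · intro H x hx; rw [← pvContains_eq_okc x (hdomx x hx)]; exact H x hx
    · intro H x hx; rw [pvContains_eq_okc x (hdomx x hx)]; exact H x hx
  rw [hall, pvScan_zero, pvStartswith_eq, pvEndswith_eq_lastHy]
  by_cases ha : pvAlnumAscii c = true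
  · have hne := pvAlnum_ne_hyphen ha
    cases rest with
    | nil => simp [pvOkc, ha, hne, pvLastHy]
    | cons d t =>
      have hl : pvLastHy (c :: d :: t) = pvLastHy (d :: t) := rfl
      cases hA : (d :: t).all pvOkc <;> cases hL : pvLastHy (d :: t) <;>
        simp [hl, hA, hL, pvOkc, ha, hne]
  · have ha' : pvAlnumAscii c = false := by simpa using ha
    by_cases hh : c = '-'
    · subst hh; simp [pvOkc, ha']
    · have hne : (c == '-') = false := by simp [hh]
      simp [pvOkc, ha', hne]

theorem pvNonTld' (cs : List Char) (hne : cs ≠ []) (hd : cs.all pvDomChar = true) :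
    (if (!cs.all fun c => PySem.Set.contains pvAllowedChars c) = true then false
     else if (PySem.Chars.startswith cs "-".toList || PySem.Chars.endswith cs "-".toList) = true
       then false else true) = pvScan 0 cs := by
  cases cs with
  | nil => exact absurd rfl hne
  | cons c rest =>
    have h1 : "-".toList = ['-'] := rfl
    rw [h1]
    exact pvNonTld c rest hd

-- ===== VERDICT (by name: the statement is the Claim_ definition above) =====
theorem validate_domain_label_py_spec : Claim_equal_validate_domain_label_py := by
  intro label is_tld hdom
  unfold Spec_validate_domain_label_py validate_domain_label_py validate_domain_label_py_alt
  have hdom' : label.toList.all pvDomChar = true := hdom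
  simp only [PySem.Str.len_eq, PySem.Str.startswith_eq, PySem.Str.endswith_eq,
    String.length_toList]
  by_cases h0 : label.length = 0
  · simp [h0]
  · by_cases h63 : label.length ≤ 63
    · have e1 : (((label.length : Int)) == 0 || decide ((label.length : Int) > 63))
          = false := by
        simp only [Bool.or_eq_false_iff, beq_eq_false_iff_ne, ne_eq, decide_eq_false_iff_not,
          not_lt]
        omega
      have e2 : (!(decide ((1 : Int) ≤ (label.length : Int))
          && decide ((label.length : Int) ≤ 63))) = false := by
        simp only [Bool.not_eq_false', Bool.and_eq_true, decide_eq_true_eq]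
        omega
      simp only [e1, e2, Bool.false_eq_true, if_false]
      cases is_tld with
      | false =>
        simp only [Bool.false_eq_true, if_false]
        exact pvNonTld' label.toList
          (fun h => h0 (by rw [← String.length_toList, h]; rfl)) hdom'
      | true =>
        simp only [if_true]
        by_cases h2 : (label.length : Int) < 2
        · have : ¬ ((2 : Int) ≤ (label.length : Int)) := by omega
          simp [h2, this]
        · have : ((2 : Int) ≤ (label.length : Int)) := by omega
          simp only [h2, if_false, this, decide_true, Bool.true_and]
          cases PySem.Str.strIsalpha label <;> simp
    · have e1 : (((label.length : Int)) == 0 || decide ((label.length : Int) > 63))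
          = true := by
        simp only [Bool.or_eq_true, beq_iff_eq, decide_eq_true_eq]
        omega
      have e2 : (!(decide ((1 : Int) ≤ (label.length : Int))
          && decide ((label.length : Int) ≤ 63))) = true := by
        simp only [Bool.not_eq_true', Bool.and_eq_false_iff, decide_eq_false_iff_not, not_le]
        omega
      simp only [e1, e2, if_true]
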